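-- pv_equiv track=rewrite | github.com/mtang724/BSENSE-in-cabin | DataCollection/NeuLog/align_vtrigu_neulog.py | find_alignment_indices
-- ===== SOURCE A (Python) =====
-- def find_alignment_indices(timestamps1, timestamps2):
--     """
--     Find the starting alignment indices for two lists of timestamps.
--
--     :param timestamps1: First list of timestamps.
--     :param timestamps2: Second list of timestamps.
--     :return: A tuple containing the index in the first list and the index in the second list where the alignment starts.
--     """
--     min_diff = float('inf')
--     align_index_1 = -1
--     align_index_2 = -1
--
--     for i, t1 in enumerate(timestamps1):
--         # Find the closest timestamp in the second list and its index
--         closest_diff, j = min((abs(t1 - t2), idx) for idx, t2 in enumerate(timestamps2))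
--
--         # Update the align_index if this is the smallest difference found so far
--         if closest_diff < min_diff:
--             min_diff = closest_diff
--             align_index_1 = i
--             align_index_2 = j
--
--     return align_index_1, align_index_2
-- ===== SOURCE B (Python) =====
-- def _bisect_left(vals, t):
--     lo, hi = 0, len(vals)
--     while lo < hi:
--         mid = (lo + hi) // 2
--         if vals[mid] < t:
--             lo = mid + 1
--         else:
--             hi = mid
--     return lo
--
--
-- def _nearest(vals, first, t):
--     """Closest value to t among the sorted distinct vals, as (distance, first index
--     in the original list); ties broken towards the smaller first index."""
--     p = _bisect_left(vals, t)
--     cand = None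
--     if p < len(vals):
--         cand = (abs(t - vals[p]), first[vals[p]])
--     if p > 0:
--         c2 = (t - vals[p - 1], first[vals[p - 1]])
--         if cand is None or c2 < cand:
--             cand = c2
--     return cand
--
--
-- def find_alignment_indices(timestamps1, timestamps2):
--     if not timestamps1 or not timestamps2:
--         return -1, -1
--     first = {}
--     for j, v in enumerate(timestamps2):
--         if v not in first:
--             first[v] = j
--     vals = sorted(first)
--     best = None  # (diff, i, j)
--     for i, t1 in enumerate(timestamps1):
--         d, j = _nearest(vals, first, t1)
--         if best is None or d < best[0]:
--             best = (d, i, j)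
--     return best[1], best[2]
-- ===== Notes on version B (the rewrite author's own statement) =====
-- stated objective: faster
-- what changed: B replaces A's inner linear scan of timestamps2 per t1 (min over all pairs) by a one-time first-occurrence dict plus a sorted distinct-value list, then a hand-written binary search per t1 that inspects only the two neighbouring values, reproducing A's (diff, index) tie-breaks exactly.
import Mathlib
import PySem

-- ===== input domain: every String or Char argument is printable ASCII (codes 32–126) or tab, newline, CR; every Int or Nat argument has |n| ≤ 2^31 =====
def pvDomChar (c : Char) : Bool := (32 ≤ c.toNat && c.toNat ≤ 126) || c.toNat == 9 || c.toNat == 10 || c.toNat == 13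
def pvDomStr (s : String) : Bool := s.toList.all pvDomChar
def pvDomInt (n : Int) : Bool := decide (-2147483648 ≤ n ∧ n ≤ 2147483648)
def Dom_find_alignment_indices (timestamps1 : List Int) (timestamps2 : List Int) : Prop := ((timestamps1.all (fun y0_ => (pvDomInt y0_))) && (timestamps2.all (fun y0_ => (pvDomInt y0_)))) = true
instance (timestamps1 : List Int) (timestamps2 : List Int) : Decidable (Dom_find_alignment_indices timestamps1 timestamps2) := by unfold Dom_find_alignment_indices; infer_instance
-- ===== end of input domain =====

-- B replaces A's nested scan by a first-occurrence dict + sorted distinct values + binary search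
-- per t1 (objective: faster); inputs where A raises ValueError (non-empty timestamps1 with empty
-- timestamps2) are excluded by Pre_ (B returns the sentinel (-1, -1) there).


-- ===== PORT A =====
-- state: (min_diff as Option Int, float('inf') = none — every actual diff is below it; align_index_1; align_index_2)
def find_alignment_indices (timestamps1 : List Int) (timestamps2 : List Int) : Int × Int :=
  let st := (PySem.List.enumerate timestamps1).foldl
    (fun (st : Option Int × Int × Int) (p : Int × Int) =>
      match PySem.List.min2?
          ((PySem.List.enumerate timestamps2).map (fun q => (|p.2 - q.2|, q.1)))
          (fun r => r.1) (fun r => r.2) with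
      | none => st   -- Python raises ValueError here (empty timestamps2); excluded by Pre_
      | some cj =>
        match st.1 with
        | none => (some cj.1, p.1, cj.2)
        | some md => if cj.1 < md then (some cj.1, p.1, cj.2) else st)
    (none, -1, -1)
  (st.2.1, st.2.2)

-- ===== PORT B =====
-- hand-written bisect_left loop from Source B (while lo < hi …), recursion on hi - lo
def pvBisect (vals : List Int) (t : Int) (lo hi : Nat) : Nat :=
  if h : lo < hi then
    if vals.getD ((lo + hi) / 2) 0 < t then pvBisect vals t ((lo + hi) / 2 + 1) hi
    else pvBisect vals t lo ((lo + hi) / 2)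
  else lo
termination_by hi - lo
decreasing_by all_goals omega

-- first-occurrence index of each value of timestamps2 (Source B's dict `first`)
def pvFirstDict (timestamps2 : List Int) : PySem.Dict Int Int :=
  (PySem.List.enumerate timestamps2).foldl
    (fun d q => if d.contains q.2 then d else d.insert q.2 q.1) PySem.Dict.empty

-- Source B's _nearest: closest value via the two bisect neighbours, lex tie-break on (diff, first index)
def pvNearest (vals : List Int) (first : PySem.Dict Int Int) (t : Int) : Option (Int × Int) :=
  let p := pvBisect vals t 0 vals.length
  let cand : Option (Int × Int) :=
    if p < vals.length then some (|t - vals.getD p 0|, first.getD (vals.getD p 0) 0) else none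
  if 0 < p then
    let c2 : Int × Int := (t - vals.getD (p - 1) 0, first.getD (vals.getD (p - 1) 0) 0)
    match cand with
    | none => some c2
    | some c => if c2.1 < c.1 ∨ (c2.1 = c.1 ∧ c2.2 < c.2) then some c2 else some c
  else cand

def find_alignment_indices_alt (timestamps1 : List Int) (timestamps2 : List Int) : Int × Int :=
  if timestamps1 = [] ∨ timestamps2 = [] then (-1, -1)
  else
    let first := pvFirstDict timestamps2
    let vals := PySem.List.sorted first.keys (fun x => x) false
    let st := (PySem.List.enumerate timestamps1).foldl
      (fun (st : Option Int × Int × Int) (p : Int × Int) =>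
        match pvNearest vals first p.2 with
        | none => st   -- unreachable: vals ≠ [] here
        | some dj =>
          match st.1 with
          | none => (some dj.1, p.1, dj.2)
          | some bd => if dj.1 < bd then (some dj.1, p.1, dj.2) else st)
      (none, -1, -1)
    (st.2.1, st.2.2)

-- ===== PRECONDITION & SPEC =====
-- Pre_ excludes exactly the inputs where A raises ValueError: non-empty timestamps1 with empty timestamps2.
def Pre_find_alignment_indices (timestamps1 : List Int) (timestamps2 : List Int) : Prop :=
  timestamps1 ≠ [] → timestamps2 ≠ []
instance (timestamps1 : List Int) (timestamps2 : List Int) : Decidable (Pre_find_alignment_indices timestamps1 timestamps2) := by unfold Pre_find_alignment_indices; infer_instance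
def pvWitness_find_alignment_indices : List Int × List Int := ([3, 10], [1, 4, 4])

def Spec_find_alignment_indices (timestamps1 : List Int) (timestamps2 : List Int) (out : Int × Int) : Prop := out = find_alignment_indices_alt timestamps1 timestamps2
instance (timestamps1 : List Int) (timestamps2 : List Int) (out : Int × Int) : Decidable (Spec_find_alignment_indices timestamps1 timestamps2 out) := by unfold Spec_find_alignment_indices; infer_instance

-- ===== CLAIM (what is proved, stated in full; the proofs are below) =====
def Claim_equal_find_alignment_indices : Prop := ∀ (timestamps1 : List Int) (timestamps2 : List Int), Dom_find_alignment_indices timestamps1 timestamps2 → Pre_find_alignment_indices timestamps1 timestamps2 → Spec_find_alignment_indices timestamps1 timestamps2 (find_alignment_indices timestamps1 timestamps2)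

-- ===== LEMMAS AND PROOFS =====

-- enumerate membership characterisation
theorem pv_mem_enumerate_iff (xs : List Int) (s : Int) (y : Int × Int) :
    y ∈ PySem.List.enumerate xs s ↔ ∃ (j : Nat) (hj : j < xs.length), y = (s + (j : Int), xs[j]) := by
  induction xs generalizing s with
  | nil => simp [PySem.List.enumerate_nil]
  | cons x xs ih =>
    rw [PySem.List.enumerate_cons]
    constructor
    · intro hy
      rcases List.mem_cons.mp hy with h | h
      · exact ⟨0, by simp, by simpa using h⟩
      · obtain ⟨j, hj, hy⟩ := (ih (s + 1)).mp h
        refine ⟨j + 1, by simp; omega, ?_⟩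
        rw [hy]
        simp only [List.getElem_cons_succ]
        congr 1
        push_cast; ring
    · rintro ⟨j, hj, rfl⟩
      cases j with
      | zero => simp
      | succ j =>
        refine List.mem_cons.mpr (Or.inr ((ih (s + 1)).mpr ⟨j, by simp at hj; omega, ?_⟩))
        simp only [List.getElem_cons_succ]
        congr 1
        push_cast; ring

-- idxOf is the least index of its value
theorem pv_idxOf_le (xs : List Int) : ∀ (j : Nat) (hj : j < xs.length), xs.idxOf xs[j] ≤ j := by
  induction xs with
  | nil => intro j hj; simp at hj
  | cons x xs ih =>
    intro j hj
    cases j with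
    | zero => simp
    | succ j =>
      by_cases hx : x = xs[j]'(by simpa using Nat.lt_of_succ_lt_succ hj)
      · simp [List.idxOf_cons, ← hx]
      · have := ih j (by simpa using Nat.lt_of_succ_lt_succ hj)
        simp only [List.getElem_cons_succ, List.idxOf_cons]
        have hne : (x == xs[j]'(by simpa using Nat.lt_of_succ_lt_succ hj)) = false := by
          simpa using hx
        simp [hne]
        omega

-- the first-occurrence fold: lookup characterisation
theorem pv_first_get? (l : List Int) : ∀ (n : Int) (d : PySem.Dict Int Int) (v : Int),
    ((PySem.List.enumerate l n).foldl
        (fun d q => if d.contains q.2 then d else d.insert q.2 q.1) d).get? v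
      = if d.contains v then d.get? v
        else if v ∈ l then some (n + (l.idxOf v : Int)) else none := by
  induction l with
  | nil =>
    intro n d v
    simp only [PySem.List.enumerate_nil, List.foldl_nil, List.not_mem_nil, if_false]
    by_cases hdv : d.contains v
    · simp [hdv]
    · rw [if_neg hdv]
      rw [PySem.Dict.contains_eq_isSome_get?] at hdv
      simpa using hdv
  | cons x l ih =>
    intro n d v
    rw [PySem.List.enumerate_cons, List.foldl_cons]
    by_cases hdx : d.contains x
    · rw [if_pos hdx, ih]
      by_cases hdv : d.contains v
      · simp [hdv]
      · rw [if_neg hdv, if_neg hdv]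
        by_cases hvx : v = x
        · subst hvx; exact absurd hdx hdv
        · simp only [List.mem_cons, hvx, false_or]
          by_cases hvl : v ∈ l
          · rw [if_pos hvl, if_pos hvl]
            have : (x :: l).idxOf v = l.idxOf v + 1 := by
              simp [List.idxOf_cons, show (x == v) = false by simpa using (Ne.symm hvx)]
            rw [this]; push_cast; ring_nf
          · simp [hvl]
    · rw [if_neg hdx, ih]
      by_cases hvx : v = x
      · subst hvx
        have h1 : (d.insert v n).contains v := PySem.Dict.contains_insert_self d v n
        rw [if_pos h1, PySem.Dict.get?_insert_self]
        rw [if_neg hdx, if_pos (List.mem_cons_self)]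
        simp [List.idxOf_cons]
      · have h1 : (d.insert x n).contains v = d.contains v := by
          rw [PySem.Dict.contains_insert]
          simp [show (v == x) = false by simpa using hvx]
        rw [h1, PySem.Dict.get?_insert_of_ne (hne := hvx)]
        by_cases hdv : d.contains v
        · simp [hdv]
        · rw [if_neg hdv, if_neg hdv]
          simp only [List.mem_cons, hvx, false_or]
          by_cases hvl : v ∈ l
          · rw [if_pos hvl, if_pos hvl]
            have : (x :: l).idxOf v = l.idxOf v + 1 := by
              simp [List.idxOf_cons, show (x == v) = false by simpa using (Ne.symm hvx)]
            rw [this]; push_cast; ring_nf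
          · simp [hvl]

-- keys of the first-occurrence fold stay Nodup
theorem pv_first_nodup (l : List (Int × Int)) :
    ∀ (d : PySem.Dict Int Int), d.keys.Nodup →
    (l.foldl (fun d q => if d.contains q.2 then d else d.insert q.2 q.1) d).keys.Nodup := by
  induction l with
  | nil => intro d hd; simpa using hd
  | cons q l ih =>
    intro d hd
    rw [List.foldl_cons]
    by_cases h : d.contains q.2
    · rw [if_pos h]; exact ih d hd
    · rw [if_neg h]; exact ih _ (PySem.Dict.nodup_keys_insert d q.2 q.1 hd)

-- pvFirstDict: lookup and membership, specialised
theorem pv_firstDict_get (ts2 : List Int) (v : Int) (hv : v ∈ ts2) :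
    (pvFirstDict ts2).getD v 0 = (ts2.idxOf v : Int) := by
  show ((pvFirstDict ts2).get? v).getD 0 = _
  unfold pvFirstDict
  rw [pv_first_get?]
  simp [hv, PySem.Dict.contains_empty]

theorem pv_firstDict_contains (ts2 : List Int) (v : Int) :
    (pvFirstDict ts2).contains v = decide (v ∈ ts2) := by
  rw [PySem.Dict.contains_eq_isSome_get?]
  unfold pvFirstDict
  rw [pv_first_get?]
  by_cases hv : v ∈ ts2 <;> simp [hv, PySem.Dict.contains_empty]

theorem pv_firstDict_nodup (ts2 : List Int) : (pvFirstDict ts2).keys.Nodup := by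
  unfold pvFirstDict
  exact pv_first_nodup _ _ (PySem.Dict.nodup_keys_empty)

-- monotone access in a Pairwise (≤) list
theorem pv_mono_getElem (vals : List Int) (hmono : vals.Pairwise (· ≤ ·))
    (i j : Nat) (hij : i ≤ j) (hj : j < vals.length) : vals[i]'(by omega) ≤ vals[j] := by
  rcases Nat.lt_or_ge i j with h | h
  · exact List.pairwise_iff_getElem.mp hmono i j (by omega) hj h
  · have : i = j := by omega
    subst this; exact le_refl _

-- binary-search loop specification (fuel induction on hi - lo)
theorem pvBisect_spec (vals : List Int) (t : Int) (hmono : vals.Pairwise (· ≤ ·)) :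
    ∀ (n lo hi : Nat), hi - lo ≤ n → lo ≤ hi → hi ≤ vals.length →
    (∀ (k : Nat) (hk : k < vals.length), k < lo → vals[k] < t) →
    (∀ (k : Nat) (hk : k < vals.length), hi ≤ k → t ≤ vals[k]) →
    lo ≤ pvBisect vals t lo hi ∧ pvBisect vals t lo hi ≤ hi ∧
    (∀ (k : Nat) (hk : k < vals.length), k < pvBisect vals t lo hi → vals[k] < t) ∧
    (∀ (k : Nat) (hk : k < vals.length), pvBisect vals t lo hi ≤ k → t ≤ vals[k]) := by
  intro n
  induction n with
  | zero =>
    intro lo hi hfuel hle hlen hlow hhigh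
    have : ¬ lo < hi := by omega
    rw [pvBisect, dif_neg this]
    exact ⟨le_refl _, by omega, fun k hk hkp => hlow k hk hkp, fun k hk hkp => hhigh k hk (by omega)⟩
  | succ n ih =>
    intro lo hi hfuel hle hlen hlow hhigh
    by_cases h : lo < hi
    · rw [pvBisect, dif_pos h]
      have hmidlt : (lo + hi) / 2 < hi := by omega
      have hmidge : lo ≤ (lo + hi) / 2 := by omega
      have hmidlen : (lo + hi) / 2 < vals.length := by omega
      rw [List.getD_eq_getElem vals 0 hmidlen]
      by_cases hv : vals[(lo + hi) / 2] < t
      · rw [if_pos hv]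
        exact And.imp (fun h1 => by omega) (fun h2 => h2)
          (ih ((lo + hi) / 2 + 1) hi (by omega) (by omega) hlen
            (fun k hk hkp => by
              rcases Nat.lt_or_ge k lo with hkl | hkl
              · exact hlow k hk hkl
              · exact lt_of_le_of_lt (pv_mono_getElem vals hmono k ((lo + hi) / 2) (by omega) hmidlen) hv)
            hhigh)
      · rw [if_neg hv]
        push_neg at hv
        exact And.imp (fun h1 => by omega) (And.imp (fun h2 => by omega) (fun h2 => h2))
          (ih lo ((lo + hi) / 2) (by omega) (by omega) (by omega) hlow
            (fun k hk hkp => le_trans hv (pv_mono_getElem vals hmono ((lo + hi) / 2) k hkp hk)))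
    · rw [pvBisect, dif_neg h]
      exact ⟨le_refl _, by omega, fun k hk hkp => hlow k hk hkp, fun k hk hkp => hhigh k hk (by omega)⟩

-- min2? as a fold with an explicit step (definitional)
def pvStep (acc : Option (Int × Int)) (x : Int × Int) : Option (Int × Int) :=
  match acc with
  | none => some x
  | some m => if (decide (x.1 < m.1) || !decide (m.1 < x.1) && decide (x.2 < m.2)) = true
              then some x else some m

theorem pv_min2?_eq_foldl (xs : List (Int × Int)) :
    PySem.List.min2? xs (fun r => r.1) (fun r => r.2) = xs.foldl pvStep none := by
  unfold PySem.List.min2?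
  congr 1
  funext acc x
  cases acc <;> rfl

theorem pv_foldl_step_fixed (xs : List (Int × Int)) (m : Int × Int)
    (h : ∀ y ∈ xs, y = m ∨ m.1 < y.1 ∨ (m.1 = y.1 ∧ m.2 < y.2)) :
    xs.foldl pvStep (some m) = some m := by
  induction xs with
  | nil => rfl
  | cons x xs ih =>
    rw [List.foldl_cons]
    have hx := h x (List.mem_cons_self)
    have hstep : pvStep (some m) x = some m := by
      rcases hx with rfl | h1 | ⟨h1, h2⟩ <;> simp [pvStep] <;> intro <;> omega
    rw [hstep]
    exact ih (fun y hy => h y (List.mem_cons_of_mem _ hy))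

theorem pv_foldl_step_reaches (xs : List (Int × Int)) (m : Int × Int) :
    ∀ (a : Int × Int), m ∈ xs →
    (∀ y ∈ xs, y = m ∨ m.1 < y.1 ∨ (m.1 = y.1 ∧ m.2 < y.2)) →
    (m.1 < a.1 ∨ (m.1 = a.1 ∧ m.2 < a.2)) →
    xs.foldl pvStep (some a) = some m := by
  induction xs with
  | nil => intro a hm; simp at hm
  | cons x xs ih =>
    intro a hm h ha
    rw [List.foldl_cons]
    by_cases hxm : x = m
    · subst hxm
      have hstep : pvStep (some a) x = some x := by
        rcases ha with h1 | ⟨h1, h2⟩ <;> simp [pvStep] <;> intro <;> omega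
      rw [hstep]
      exact pv_foldl_step_fixed xs x (fun y hy => h y (List.mem_cons_of_mem _ hy))
    · have hm' : m ∈ xs := by
        rcases List.mem_cons.mp hm with h1 | h1
        · exact absurd h1.symm hxm
        · exact h1
      have hx := h x (List.mem_cons_self)
      have hlt : m.1 < x.1 ∨ (m.1 = x.1 ∧ m.2 < x.2) := by
        rcases hx with h1 | h1 | h1
        · exact absurd h1 hxm
        · exact Or.inl h1
        · exact Or.inr h1
      have : pvStep (some a) x = some a ∨ pvStep (some a) x = some x := by
        simp only [pvStep]; split_ifs <;> [exact Or.inr rfl; exact Or.inl rfl]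
      rcases this with hs | hs <;> rw [hs]
      · exact ih a hm' (fun y hy => h y (List.mem_cons_of_mem _ hy)) ha
      · exact ih x hm' (fun y hy => h y (List.mem_cons_of_mem _ hy)) hlt

theorem pv_min2?_eq_of (xs : List (Int × Int)) (m : Int × Int) (hm : m ∈ xs)
    (h : ∀ y ∈ xs, y = m ∨ m.1 < y.1 ∨ (m.1 = y.1 ∧ m.2 < y.2)) :
    PySem.List.min2? xs (fun r => r.1) (fun r => r.2) = some m := by
  rw [pv_min2?_eq_foldl]
  rcases xs with _ | ⟨x, xs⟩
  · simp at hm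
  · rw [List.foldl_cons]
    have hstep : pvStep none x = some x := rfl
    rw [hstep]
    by_cases hxm : x = m
    · subst hxm
      exact pv_foldl_step_fixed xs x (fun y hy => h y (List.mem_cons_of_mem _ hy))
    · have hm' : m ∈ xs := by
        rcases List.mem_cons.mp hm with h1 | h1
        · exact absurd h1.symm hxm
        · exact h1
      have hx := h x (List.mem_cons_self)
      have hlt : m.1 < x.1 ∨ (m.1 = x.1 ∧ m.2 < x.2) := by
        rcases hx with h1 | h1 | h1
        · exact absurd h1 hxm
        · exact Or.inl h1
        · exact Or.inr h1
      exact pv_foldl_step_reaches xs m x hm' (fun y hy => h y (List.mem_cons_of_mem _ hy)) hlt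

-- pvNearest returns the (distance, first-index) pair of a closest value, with A's tie-breaks
theorem pvNearest_spec (ts2 vals : List Int) (first : PySem.Dict Int Int)
    (hmem : ∀ v : Int, v ∈ vals ↔ v ∈ ts2)
    (hlt : vals.Pairwise (· < ·))
    (hget : ∀ v ∈ ts2, first.getD v 0 = (ts2.idxOf v : Int))
    (hne : vals ≠ []) (t : Int) :
    ∃ dj : Int × Int, pvNearest vals first t = some dj ∧
      (∃ v, v ∈ ts2 ∧ dj.1 = |t - v| ∧ dj.2 = (ts2.idxOf v : Int)) ∧
      (∀ v ∈ ts2, dj.1 < |t - v| ∨ (dj.1 = |t - v| ∧ dj.2 ≤ (ts2.idxOf v : Int))) := by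
  have hmono : vals.Pairwise (· ≤ ·) := hlt.imp (fun h => le_of_lt h)
  have hL : 0 < vals.length := List.length_pos_iff.mpr hne
  obtain ⟨_, hplen, hbelow, habove⟩ :=
    pvBisect_spec vals t hmono vals.length 0 vals.length (by omega) (by omega) (le_refl _)
      (fun k hk hkp => by omega) (fun k hk hkp => by omega)
  simp only [pvNearest]
  set p := pvBisect vals t 0 vals.length with hp
  rcases Nat.lt_or_ge p vals.length with hplt | hpge
  · have e1 : vals.getD p 0 = vals[p] := List.getD_eq_getElem vals 0 hplt
    have hmemhi : vals[p] ∈ ts2 := (hmem _).mp (List.getElem_mem hplt)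
    have hhi : t ≤ vals[p] := habove p hplt (le_refl p)
    have hgethi : first.getD vals[p] 0 = (ts2.idxOf vals[p] : Int) := hget _ hmemhi
    have habshi : |t - vals[p]| = vals[p] - t := by
      rw [abs_of_nonpos (by omega)]; ring
    rw [e1, if_pos hplt]
    by_cases hp0 : 0 < p
    · -- both neighbours exist
      have hp1lt : p - 1 < vals.length := by omega
      have e2 : vals.getD (p - 1) 0 = vals[p - 1] := List.getD_eq_getElem vals 0 hp1lt
      have hmemlo : vals[p - 1] ∈ ts2 := (hmem _).mp (List.getElem_mem hp1lt)
      have hlo : vals[p - 1] < t := hbelow (p - 1) hp1lt (by omega)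
      have hgetlo : first.getD vals[p - 1] 0 = (ts2.idxOf vals[p - 1] : Int) := hget _ hmemlo
      have habslo : |t - vals[p - 1]| = t - vals[p - 1] := abs_of_nonneg (by omega)
      rw [if_pos hp0, e2]
      have hbound : ∀ v ∈ ts2,
          (t - vals[p - 1] ≤ |t - v| ∧ (|t - v| = t - vals[p - 1] → v = vals[p - 1])) ∨
          (vals[p] - t ≤ |t - v| ∧ (|t - v| = vals[p] - t → v = vals[p])) := by
        intro v hv
        obtain ⟨k, hk, hvk⟩ := List.mem_iff_getElem.mp ((hmem v).mpr hv)
        subst hvk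
        rcases Nat.lt_or_ge k p with hkp | hkp
        · left
          have h1 : vals[k] < t := hbelow k hk hkp
          have h2 : vals[k] ≤ vals[p - 1] := pv_mono_getElem vals hmono k (p - 1) (by omega) hp1lt
          rw [abs_of_nonneg (by omega)]
          exact ⟨by omega, by omega⟩
        · right
          have h1 : t ≤ vals[k] := habove k hk hkp
          have h2 : vals[p] ≤ vals[k] := pv_mono_getElem vals hmono p k hkp hk
          rw [abs_of_nonpos (by omega)]
          exact ⟨by omega, by omega⟩
      have hred : (match some (|t - vals[p]|, first.getD (vals[p]) 0) with
          | none => some (t - vals[p - 1], first.getD (vals[p - 1]) 0)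
          | some c =>
            if t - vals[p - 1] < c.1 ∨ t - vals[p - 1] = c.1 ∧ first.getD (vals[p - 1]) 0 < c.2 then
              some (t - vals[p - 1], first.getD (vals[p - 1]) 0)
            else some c)
          = (if t - vals[p - 1] < |t - vals[p]| ∨
                t - vals[p - 1] = |t - vals[p]| ∧ first.getD (vals[p - 1]) 0 < first.getD (vals[p]) 0 then
              some (t - vals[p - 1], first.getD (vals[p - 1]) 0)
            else some (|t - vals[p]|, first.getD (vals[p]) 0)) := rfl
      rw [hred]
      split_ifs with htie
      · -- c2 chosen: the lower neighbour wins
        refine ⟨_, rfl, ⟨vals[p - 1], hmemlo, by simpa using habslo.symm, by simpa using hgetlo⟩, ?_⟩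
        intro v hv
        simp only
        rcases hbound v hv with ⟨hb, hbe⟩ | ⟨hb, hbe⟩
        · by_cases he : |t - v| = t - vals[p - 1]
          · right
            refine ⟨he.symm, ?_⟩
            rw [hgetlo, hbe he]
          · left; exact lt_of_le_of_ne hb (fun hx => he hx.symm)
        · -- upper side values: c2 won the tie-break
          rcases htie with hlt2 | ⟨heq2, hjlt⟩
          · left
            have hcmp : t - vals[p - 1] < vals[p] - t := by
              rw [habshi] at hlt2; exact hlt2
            omega
          · by_cases he : |t - v| = vals[p] - t
            · right
              rw [habshi] at heq2
              refine ⟨by omega, ?_⟩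
              rw [hgetlo, hbe he, ← hgethi, ← hgetlo]
              exact le_of_lt hjlt
            · left
              rw [habshi] at heq2
              have h3 : t - vals[p - 1] ≤ vals[p] - t := by omega
              exact lt_of_le_of_lt h3 (lt_of_le_of_ne hb (fun hx => he hx.symm))
      · -- cand chosen: the upper neighbour wins (or the tie went to it)
        have hnot : vals[p] - t < t - vals[p - 1] ∨
            (vals[p] - t = t - vals[p - 1] ∧ first.getD (vals[p]) 0 ≤ first.getD (vals[p - 1]) 0) := by
          rw [not_or, not_lt, not_and_or, not_lt] at htie
          rcases htie with ⟨hge, h⟩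
          rw [habshi] at hge h
          rcases h with h | h
          · left; omega
          · rcases lt_or_eq_of_le hge with h1 | h1
            · left; omega
            · right; exact ⟨h1, h⟩
        refine ⟨_, rfl, ⟨vals[p], hmemhi, by simpa using habshi.symm, by simpa using hgethi⟩, ?_⟩
        intro v hv
        simp only
        rcases hbound v hv with ⟨hb, hbe⟩ | ⟨hb, hbe⟩
        · -- lower side values
          by_cases he : |t - v| = t - vals[p - 1]
          · rcases hnot with h | ⟨h1, h2⟩
            · left; rw [habshi]; omega
            · right
              refine ⟨by rw [habshi]; omega, ?_⟩
              rw [hgethi, hbe he, ← hgetlo, ← hgethi]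
              exact h2
          · left
            rw [habshi]
            have h4 : t - vals[p - 1] < |t - v| := lt_of_le_of_ne hb (fun hx => he hx.symm)
            rcases hnot with h | ⟨h1, h2⟩ <;> omega
        · by_cases he : |t - v| = vals[p] - t
          · right
            refine ⟨by rw [habshi, he], ?_⟩
            rw [hgethi, ← hbe he]
          · left
            rw [habshi]
            exact lt_of_le_of_ne hb (fun hx => he hx.symm)
    · -- p = 0: only the upper neighbour exists
      rw [if_neg hp0]
      refine ⟨_, rfl, ⟨vals[p], hmemhi, by simpa using habshi.symm, by simpa using hgethi⟩, ?_⟩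
      intro v hv
      simp only
      obtain ⟨k, hk, hvk⟩ := List.mem_iff_getElem.mp ((hmem v).mpr hv)
      subst hvk
      have h1 : t ≤ vals[k] := habove k hk (by omega)
      have h2 : vals[p] ≤ vals[k] := pv_mono_getElem vals hmono p k (by omega) hk
      by_cases he : vals[k] = vals[p]
      · right
        exact ⟨by rw [he, habshi], by rw [he, hgethi]⟩
      · left
        rw [habshi, abs_of_nonpos (by omega)]
        have h3 : vals[p] < vals[k] := lt_of_le_of_ne h2 (fun hx => he hx.symm)
        omega
  · -- p = len: only the lower neighbour exists
    have hp0 : 0 < p := by omega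
    have hp1lt : p - 1 < vals.length := by omega
    have e2 : vals.getD (p - 1) 0 = vals[p - 1] := List.getD_eq_getElem vals 0 hp1lt
    have hmemlo : vals[p - 1] ∈ ts2 := (hmem _).mp (List.getElem_mem hp1lt)
    have hlo : vals[p - 1] < t := hbelow (p - 1) hp1lt (by omega)
    have hgetlo : first.getD vals[p - 1] 0 = (ts2.idxOf vals[p - 1] : Int) := hget _ hmemlo
    have habslo : |t - vals[p - 1]| = t - vals[p - 1] := abs_of_nonneg (by omega)
    rw [if_pos hp0, if_neg (show ¬ p < vals.length by omega), e2]
    refine ⟨_, rfl, ⟨vals[p - 1], hmemlo, by simpa using habslo.symm, by simpa using hgetlo⟩, ?_⟩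
    intro v hv
    simp only
    obtain ⟨k, hk, hvk⟩ := List.mem_iff_getElem.mp ((hmem v).mpr hv)
    subst hvk
    have h1 : vals[k] < t := hbelow k hk (by omega)
    have h2 : vals[k] ≤ vals[p - 1] := pv_mono_getElem vals hmono k (p - 1) (by omega) hp1lt
    by_cases he : vals[k] = vals[p - 1]
    · right
      exact ⟨by rw [he, habslo], by rw [he, hgetlo]⟩
    · left
      rw [abs_of_nonneg (by omega)]
      have h3 : vals[k] < vals[p - 1] := lt_of_le_of_ne h2 he
      omega

-- the inner min of A equals B's neighbour search
theorem pv_inner_eq (ts2 : List Int) (h2 : ts2 ≠ []) (t : Int) :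
    PySem.List.min2?
      ((PySem.List.enumerate ts2).map (fun q => (|t - q.2|, q.1)))
      (fun r => r.1) (fun r => r.2)
      = pvNearest (PySem.List.sorted (pvFirstDict ts2).keys (fun x => x) false)
          (pvFirstDict ts2) t := by
  have hmem : ∀ v : Int, v ∈ PySem.List.sorted (pvFirstDict ts2).keys (fun x => x) false ↔ v ∈ ts2 := by
    intro v
    rw [PySem.List.mem_sorted, ← PySem.Dict.contains_iff_mem_keys, pv_firstDict_contains]
    simp
  have hnodup : (PySem.List.sorted (pvFirstDict ts2).keys (fun x => x) false).Nodup :=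
    (PySem.List.sorted_perm _ _ _).symm.nodup (pv_firstDict_nodup ts2)
  have hle : (PySem.List.sorted (pvFirstDict ts2).keys (fun x => x) false).Pairwise (· ≤ ·) := by
    simpa using PySem.List.sorted_pairwise (pvFirstDict ts2).keys (fun x => x)
  have hlt : (PySem.List.sorted (pvFirstDict ts2).keys (fun x => x) false).Pairwise (· < ·) :=
    (hle.and hnodup).imp (fun h => lt_of_le_of_ne h.1 h.2)
  have hne : PySem.List.sorted (pvFirstDict ts2).keys (fun x => x) false ≠ [] := by
    obtain ⟨v, hv⟩ := List.exists_mem_of_ne_nil ts2 h2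
    exact List.ne_nil_of_mem ((hmem v).mpr hv)
  obtain ⟨dj, hdj, ⟨vstar, hvmem, hd1, hd2⟩, hminall⟩ :=
    pvNearest_spec ts2 _ (pvFirstDict ts2) hmem hlt (fun v hv => pv_firstDict_get ts2 v hv) hne t
  rw [hdj]
  apply pv_min2?_eq_of
  · apply List.mem_map.mpr
    have hjlt : ts2.idxOf vstar < ts2.length := List.idxOf_lt_length_of_mem hvmem
    refine ⟨((0 : Int) + (ts2.idxOf vstar : Int), ts2[ts2.idxOf vstar]), ?_, ?_⟩
    · exact (pv_mem_enumerate_iff ts2 0 _).mpr ⟨ts2.idxOf vstar, hjlt, rfl⟩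
    · have hgv : ts2[ts2.idxOf vstar] = vstar := List.getElem_idxOf hjlt
      rw [hgv]
      have : dj = (|t - vstar|, (ts2.idxOf vstar : Int)) := Prod.ext hd1 hd2
      rw [this]
      simp
  · intro y hy
    obtain ⟨q, hq, rfl⟩ := List.mem_map.mp hy
    obtain ⟨j, hj, rfl⟩ := (pv_mem_enumerate_iff ts2 0 q).mp hq
    have hvmem2 : ts2[j] ∈ ts2 := List.getElem_mem hj
    rcases hminall ts2[j] hvmem2 with hstrict | ⟨heq, hle2⟩
    · right; left; simpa using hstrict
    · have hidx : (ts2.idxOf ts2[j] : Int) ≤ (j : Int) := by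
        exact_mod_cast pv_idxOf_le ts2 j hj
      rcases lt_or_eq_of_le (le_trans hle2 hidx) with hjlt2 | hjeq
      · right; right
        exact ⟨by simpa using heq, by simpa using hjlt2⟩
      · left
        refine Prod.ext (by simpa using heq.symm) ?_
        simpa using hjeq.symm

-- ===== VERDICT (by name: the statement is the Claim_ definition above) =====
theorem find_alignment_indices_spec : Claim_equal_find_alignment_indices := by
  intro ts1 ts2 _ hpre
  unfold Spec_find_alignment_indices find_alignment_indices find_alignment_indices_alt
  by_cases h1 : ts1 = []
  · subst h1; simp [PySem.List.enumerate_nil]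
  · have h2 : ts2 ≠ [] := hpre h1
    rw [if_neg (by simp [h1, h2])]
    have := List.foldl_ext (l := PySem.List.enumerate ts1)
      (f := fun (st : Option Int × Int × Int) (p : Int × Int) =>
        match PySem.List.min2?
            ((PySem.List.enumerate ts2).map (fun q => (|p.2 - q.2|, q.1)))
            (fun r => r.1) (fun r => r.2) with
        | none => st
        | some cj =>
          match st.1 with
          | none => (some cj.1, p.1, cj.2)
          | some md => if cj.1 < md then (some cj.1, p.1, cj.2) else st)
      (g := fun (st : Option Int × Int × Int) (p : Int × Int) =>
        match pvNearest (PySem.List.sorted (pvFirstDict ts2).keys (fun x => x) false)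
            (pvFirstDict ts2) p.2 with
        | none => st
        | some dj =>
          match st.1 with
          | none => (some dj.1, p.1, dj.2)
          | some bd => if dj.1 < bd then (some dj.1, p.1, dj.2) else st)
      (none, -1, -1)
      (fun st p _ => by simp only [pv_inner_eq ts2 h2])
    rw [this]
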